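-- pv_equiv track=rewrite | github.com/simonjwbond/adventurer | tools/generate_clothing.py | generate_clothing_row
-- ===== SOURCE A (Python) =====
-- WIDTH = 48
--
-- def generate_clothing_row(y):
--     """Generate a single row of the clothing layer."""
--     row = [0] * WIDTH
--
--     # Jumpsuit starts at row 21 (shoulders) and goes to bottom
--     if y >= 21:
--         # Calculate body width at this height
--         if y <= 42:
--             # Torso section - wider
--             outline_x = 10 + (y - 23) // 4
--         else:
--             # Legs section - narrower
--             outline_x = 10 + (y - 43) // 6
--
--         # Draw jumpsuit color (7 = blue) between outlines
--         for x in range(outline_x + 1, WIDTH - 1 - outline_x):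
--             row[x] = 7
--
--         # Add collar detail at top of jumpsuit (row 21-23)
--         if y >= 21 and y <= 23:
--             collar_center = WIDTH // 2
--             for x in range(collar_center - 2, collar_center + 3):
--                 row[x] = 8  # zipper color
--
--         # Add vertical zipper line (rows 24-40)
--         if y > 23 and y < 41:
--             row[WIDTH // 2 - 1] = 8
--             row[WIDTH // 2] = 8
--
--     return row
-- ===== SOURCE B (Python) =====
-- WIDTH = 48
--
-- def generate_clothing_row(y):
--     """Generate a single row of the clothing layer (single classify-each-pixel pass)."""
--     if y < 21:
--         return [0] * WIDTH
--     outline_x = 10 + (y - 23) // 4 if y <= 42 else 10 + (y - 43) // 6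
--     c = WIDTH // 2
--
--     def pix(x):
--         if 21 <= y <= 23 and c - 2 <= x <= c + 2:
--             return 8
--         if 23 < y < 41 and x in (c - 1, c):
--             return 8
--         if outline_x + 1 <= x < WIDTH - 1 - outline_x:
--             return 7
--         return 0
--
--     return [pix(x) for x in range(WIDTH)]
-- ===== Notes on version B (the rewrite author's own statement) =====
-- stated objective: simpler
-- what changed: A fills a zero row and then overwrites it with three imperative segment loops (band, collar, zipper); B classifies each of the 48 columns once in a single per-pixel pass with the overwrite precedence expressed as an if-chain.
import Mathlib
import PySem

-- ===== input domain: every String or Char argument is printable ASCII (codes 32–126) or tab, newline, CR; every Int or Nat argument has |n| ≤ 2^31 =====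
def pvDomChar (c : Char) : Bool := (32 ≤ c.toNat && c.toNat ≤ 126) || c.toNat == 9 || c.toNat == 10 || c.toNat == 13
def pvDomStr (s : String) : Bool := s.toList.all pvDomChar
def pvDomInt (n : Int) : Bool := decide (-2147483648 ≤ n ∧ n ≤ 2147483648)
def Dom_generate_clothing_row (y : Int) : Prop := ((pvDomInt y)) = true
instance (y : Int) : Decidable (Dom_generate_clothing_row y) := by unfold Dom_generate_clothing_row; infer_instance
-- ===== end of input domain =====

-- B replaces A's fill-zeros-then-overwrite-three-segments strategy with a single per-column
-- classification pass (simpler decomposition; same cost).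

-- ===== PORT A =====
-- row[x] = v is ported as List.set x.toNat v: every written index here lies in [0, 48),
-- where this is exact Python semantics (no IndexError is reachable).
def generate_clothing_row (y : Int) : List Int :=
  let row : List Int := List.replicate 48 0
  if 21 ≤ y then
    let outline_x : Int :=
      if y ≤ 42 then 10 + PySem.Int.floordiv (y - 23) 4
      else 10 + PySem.Int.floordiv (y - 43) 6
    let row := (PySem.List.pyRange (outline_x + 1) (48 - 1 - outline_x) 1).foldl
      (fun r x => r.set x.toNat 7) row
    let row := if 21 ≤ y ∧ y ≤ 23 then
        let collar_center : Int := PySem.Int.floordiv 48 2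
        (PySem.List.pyRange (collar_center - 2) (collar_center + 3) 1).foldl
          (fun r x => r.set x.toNat 8) row
      else row
    let row := if 23 < y ∧ y < 41 then
        let r := row.set (PySem.Int.floordiv 48 2 - 1).toNat 8
        r.set (PySem.Int.floordiv 48 2).toNat 8
      else row
    row
  else row

-- ===== PORT B =====
def generate_clothing_row_alt (y : Int) : List Int :=
  if y < 21 then List.replicate 48 0
  else
    let outline_x : Int :=
      if y ≤ 42 then 10 + PySem.Int.floordiv (y - 23) 4
      else 10 + PySem.Int.floordiv (y - 43) 6
    let c : Int := PySem.Int.floordiv 48 2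
    (List.range 48).map (fun xn =>
      if 21 ≤ y ∧ y ≤ 23 ∧ c - 2 ≤ (xn : Int) ∧ (xn : Int) ≤ c + 2 then (8 : Int)
      else if 23 < y ∧ y < 41 ∧ ((xn : Int) = c - 1 ∨ (xn : Int) = c) then 8
      else if outline_x + 1 ≤ (xn : Int) ∧ (xn : Int) < 48 - 1 - outline_x then 7
      else 0)

-- ===== PRECONDITION & SPEC =====
def Spec_generate_clothing_row (y : Int) (out : List Int) : Prop := out = generate_clothing_row_alt y
instance (y : Int) (out : List Int) : Decidable (Spec_generate_clothing_row y out) := by unfold Spec_generate_clothing_row; infer_instance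

-- ===== CLAIM (what is proved, stated in full; the proofs are below) =====
def Claim_equal_generate_clothing_row : Prop := ∀ (y : Int), Dom_generate_clothing_row y → Spec_generate_clothing_row y (generate_clothing_row y)

-- ===== LEMMAS AND PROOFS =====

theorem pyRange_one_eq_nil (a b : Int) (h : ¬ a < b) : PySem.List.pyRange a b 1 = [] := by
  simp [PySem.List.pyRange, h]

theorem gcr_low (y : Int) (h : y < 21) :
    generate_clothing_row y = generate_clothing_row_alt y := by
  simp [generate_clothing_row, generate_clothing_row_alt, h]

theorem gcr_mid (y : Int) (h1 : 21 ≤ y) (h2 : y ≤ 120) :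
    generate_clothing_row y = generate_clothing_row_alt y := by
  interval_cases y <;> decide

-- For y ≥ 121 the blue band is empty (outline_x ≥ 23) and both programs return all zeros.
theorem gcr_high (y : Int) (h : 121 ≤ y) :
    generate_clothing_row y = generate_clothing_row_alt y := by
  have ho : (13:Int) ≤ PySem.Int.floordiv (y - 43) 6 := by
    rw [PySem.Int.le_floordiv_iff_mul_le (by omega)]; omega
  have hA : generate_clothing_row y = List.replicate 48 0 := by
    simp only [generate_clothing_row]
    rw [if_pos (by omega : (21:Int) ≤ y), if_neg (by omega : ¬ y ≤ 42),
      if_neg (by omega : ¬ (21 ≤ y ∧ y ≤ 23)), if_neg (by omega : ¬ (23 < y ∧ y < 41)),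
      pyRange_one_eq_nil _ _ (by generalize PySem.Int.floordiv (y - 43) 6 = o at ho; omega),
      List.foldl_nil]
  have hB : generate_clothing_row_alt y = List.replicate 48 0 := by
    rw [generate_clothing_row_alt, if_neg (by omega)]
    simp only
    rw [List.eq_replicate_iff]
    refine ⟨by simp, ?_⟩
    intro b hb
    simp only [List.mem_map] at hb
    obtain ⟨xn, hxn, hf⟩ := hb
    rw [if_neg (by omega), if_neg (by omega),
      if_neg (by rw [if_neg (by omega : ¬ y ≤ 42)]
                 generalize PySem.Int.floordiv (y - 43) 6 = o at ho; omega)] at hf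
    exact hf.symm
  rw [hA, hB]

-- ===== VERDICT (by name: the statement is the Claim_ definition above) =====
theorem generate_clothing_row_spec : Claim_equal_generate_clothing_row := by
  intro y _
  unfold Spec_generate_clothing_row
  by_cases h1 : y < 21
  · exact gcr_low y h1
  · by_cases h2 : y ≤ 120
    · exact gcr_mid y (by omega) h2
    · exact gcr_high y (by omega)
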